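-- pv_equiv track=rewrite | github.com/PavanSETTEM-003/State-Table-to-Boolean-Expression-Converter | State-Table-to-Boolean-Expression-Converter.py | generate_groups
-- ===== SOURCE A (Python) =====
-- def generate_groups(flip_flop_high):
--   groups = {}
--   for i in flip_flop_high:
--     ones = i.count("1")
--     if(ones not in groups):
--       groups[ones] = [i]
--     else: groups[ones].append(i)
--
--   groups = dict(sorted(groups.items()))
--   return groups
-- ===== SOURCE B (Python) =====
-- def generate_groups(flip_flop_high):
--     # sort stably by one-count, then emit maximal runs of equal count in one scan
--     ordered = sorted(flip_flop_high, key=lambda s: s.count("1"))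
--     result = {}
--     n = len(ordered)
--     i = 0
--     while i < n:
--         k = ordered[i].count("1")
--         j = i + 1
--         while j < n and ordered[j].count("1") == k:
--             j += 1
--         result[k] = ordered[i:j]
--         i = j
--     return result
-- ===== Notes on version B (the rewrite author's own statement) =====
-- stated objective: alternative
-- what changed: Replaces A's dict-grouping loop followed by sorting the dict items with a stable sort of the input by one-count followed by a single adjacent-run scan that emits each group directly in ascending key order.
import Mathlib
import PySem

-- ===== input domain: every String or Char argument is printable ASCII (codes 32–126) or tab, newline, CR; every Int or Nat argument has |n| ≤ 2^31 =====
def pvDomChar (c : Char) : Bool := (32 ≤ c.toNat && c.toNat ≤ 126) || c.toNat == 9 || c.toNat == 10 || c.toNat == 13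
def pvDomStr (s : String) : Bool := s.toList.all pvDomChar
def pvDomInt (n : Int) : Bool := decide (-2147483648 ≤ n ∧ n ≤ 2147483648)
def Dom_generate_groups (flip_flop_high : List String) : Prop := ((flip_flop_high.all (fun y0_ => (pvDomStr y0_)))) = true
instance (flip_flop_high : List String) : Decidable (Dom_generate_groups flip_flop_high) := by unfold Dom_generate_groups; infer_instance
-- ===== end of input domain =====

-- B replaces A's dict-grouping loop followed by sorting the dict items with a
-- stable sort of the input by one-count followed by a single adjacent-run scan
-- (alternative algorithm, same result).


-- ===== PORT A =====
-- the dict's keys are distinct, so sorting the items by the key alone is exactly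
-- Python's sorted(groups.items()) (the tuples' second components are never compared)
def generate_groups (flip_flop_high : List String) : List (Int × List String) :=
  let groups : PySem.Dict Int (List String) :=
    flip_flop_high.foldl (fun groups i =>
      let ones : Int := (PySem.Str.count i "1" : Int)
      if groups.contains ones = false then groups.insert ones [i]
      else groups.modify ones [] (fun v => v ++ [i])) PySem.Dict.empty
  PySem.List.sorted groups.items (fun p => p.1) false

-- ===== PORT B =====
-- the key s.count("1") of Source B
def pvKey (s : String) : Int := (PySem.Str.count s "1" : Int)

-- the outer while-loop of Source B over the sorted list: the inner j-scan collects the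
-- maximal run ordered[i:j] with the head's key (= takeWhile), and the loop resumes
-- at index j (= dropWhile); exact transcription of the two-index scan
def pvGroupBy : List String → List (Int × List String)
  | [] => []
  | x :: xs =>
    (pvKey x, x :: xs.takeWhile (fun y => pvKey y == pvKey x)) ::
      pvGroupBy (xs.dropWhile (fun y => pvKey y == pvKey x))
  termination_by l => l.length
  decreasing_by simpa [Nat.lt_succ_iff] using List.length_dropWhile_le (p := fun y => pvKey y == pvKey x) (l := xs)

def generate_groups_alt (flip_flop_high : List String) : List (Int × List String) :=
  pvGroupBy (PySem.List.sorted flip_flop_high pvKey false)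

-- ===== PRECONDITION & SPEC =====
def Spec_generate_groups (flip_flop_high : List String) (out : List (Int × List String)) : Prop := out = generate_groups_alt flip_flop_high
instance (flip_flop_high : List String) (out : List (Int × List String)) : Decidable (Spec_generate_groups flip_flop_high out) := by unfold Spec_generate_groups; infer_instance

-- ===== CLAIM (what is proved, stated in full; the proofs are below) =====
def Claim_equal_generate_groups : Prop := ∀ (flip_flop_high : List String), Dom_generate_groups flip_flop_high → Spec_generate_groups flip_flop_high (generate_groups flip_flop_high)

-- ===== LEMMAS AND PROOFS =====

-- the common normal form both programs compute: the distinct one-counts in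
-- increasing order, each paired with the input's elements of that count in order
def pvCanon (l : List String) : List (Int × List String) :=
  (PySem.List.sorted (PySem.Set.ofList (l.map pvKey)) (fun k => k) false).map
    (fun k => (k, l.filter (fun y => pvKey y == k)))

-- ---- A-side ----

-- A's loop body is exactly dict.modify with default []
theorem pv_stepA_eq (d : PySem.Dict Int (List String)) (i : String) :
    (if d.contains ((PySem.Str.count i "1" : Int)) = false
      then d.insert ((PySem.Str.count i "1" : Int)) [i]
      else d.modify ((PySem.Str.count i "1" : Int)) [] (fun v => v ++ [i]))
    = d.modify (pvKey i) [] (fun v => v ++ [i]) := by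
  unfold pvKey
  split
  · rename_i h
    simp only [PySem.Dict.modify, PySem.Dict.getD, PySem.Dict.get?]
    rw [List.find?_eq_none.mpr]
    · rfl
    · intro p hp
      simp only [PySem.Dict.contains, List.any_eq_false] at h
      simpa using h p hp
  · rfl

-- a dict with distinct keys is its key list paired with its lookups
theorem pv_items_of_nodup (ps : List (Int × List String)) (h : (ps.map Prod.fst).Nodup) :
    ps = (ps.map Prod.fst).map (fun k => (k, (PySem.Dict.mk ps).getD k [])) := by
  induction ps with
  | nil => rfl
  | cons p ps ih =>
    obtain ⟨k, v⟩ := p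
    simp only [List.map_cons, List.map_map] at h ⊢
    simp only [List.nodup_cons] at h
    congr 1
    · simp [PySem.Dict.getD, PySem.Dict.get?]
    · have := ih h.2
      conv_lhs => rw [this]
      rw [List.map_map]
      apply List.map_congr_left
      intro a ha
      have hak : Prod.fst a ≠ k := by
        intro he; exact h.1 (he ▸ List.mem_map_of_mem ha)
      simp only [Function.comp_apply, PySem.Dict.getD, PySem.Dict.get?]
      rw [List.find?_cons_of_neg]
      simpa using Ne.symm hak

def pvDictA (l : List String) : PySem.Dict Int (List String) :=
  l.foldl (fun d i => d.modify (pvKey i) [] (fun v => v ++ [i])) PySem.Dict.empty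

theorem pv_getD_dictA (l : List String) (c : Int) :
    (pvDictA l).getD c [] = l.filter (fun y => pvKey y == c) := by
  unfold pvDictA
  have hm : l.foldl (fun d i => d.modify (pvKey i) [] (fun v => v ++ [i])) PySem.Dict.empty
      = (l.map (fun i => (pvKey i, i))).foldl
          (fun d p => d.modify p.1 [] (fun v => v ++ [p.2])) PySem.Dict.empty := by
    rw [List.foldl_map]
  rw [hm, PySem.Dict.getD_foldl_modify_append]
  simp only [List.filter_map, List.map_map]
  simp [Function.comp_def]

theorem pv_keys_dictA (l : List String) :
    (pvDictA l).keys = PySem.Set.ofList (l.map pvKey) := by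
  unfold pvDictA
  rw [PySem.Dict.keys_foldl_modify_key (f := fun _ i => fun v => v ++ [i])]
  rfl

theorem pv_items_dictA (l : List String) :
    (pvDictA l).items = (PySem.Set.ofList (l.map pvKey)).map
      (fun k => (k, l.filter (fun y => pvKey y == k))) := by
  have hnd : ((pvDictA l).items.map Prod.fst).Nodup := by
    have := PySem.Dict.nodup_keys_foldl_modify_key l pvKey []
      (fun _ i => fun v => v ++ [i]) PySem.Dict.empty (by simp [PySem.Dict.empty, PySem.Dict.keys])
    simpa [PySem.Dict.keys, pvDictA] using this
  have h1 := pv_items_of_nodup (pvDictA l).items hnd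
  have h2 : (pvDictA l).items.map Prod.fst = PySem.Set.ofList (l.map pvKey) := by
    simpa [PySem.Dict.keys] using pv_keys_dictA l
  calc (pvDictA l).items
      = ((pvDictA l).items.map Prod.fst).map (fun k => (k, (PySem.Dict.mk (pvDictA l).items).getD k [])) := h1
    _ = (PySem.Set.ofList (l.map pvKey)).map (fun k => (k, l.filter (fun y => pvKey y == k))) := by
        rw [h2]
        apply List.map_congr_left
        intro k _
        have : PySem.Dict.mk (pvDictA l).items = pvDictA l := rfl
        rw [this, pv_getD_dictA]

theorem A_eq_canon (l : List String) : generate_groups l = pvCanon l := by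
  have hf : (fun (d : PySem.Dict Int (List String)) (i : String) =>
      let ones : Int := (PySem.Str.count i "1" : Int)
      if d.contains ones = false then d.insert ones [i]
      else d.modify ones [] (fun v => v ++ [i]))
      = fun d i => d.modify (pvKey i) [] (fun v => v ++ [i]) := by
    funext d i; exact pv_stepA_eq d i
  show PySem.List.sorted (l.foldl _ PySem.Dict.empty).items (fun p => p.1) false = pvCanon l
  rw [hf]
  have hitems : (pvDictA l).items = (PySem.Set.ofList (l.map pvKey)).map
      (fun k => (k, l.filter (fun y => pvKey y == k))) := pv_items_dictA l
  show PySem.List.sorted (pvDictA l).items (fun p => p.1) false = pvCanon l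
  apply PySem.List.sorted_eq_of_perm_of_pairwise_lt
  · rw [hitems]
    exact (PySem.List.sorted_perm (PySem.Set.ofList (l.map pvKey)) (fun k => k) false).map _
  · unfold pvCanon
    rw [List.pairwise_map]
    exact PySem.List.sorted_ofList_pairwise_lt (l.map pvKey)

-- ---- B-side ----

-- Set.discard commutes with Set.ofList as a filter
theorem pv_discard_ofList (m : List Int) (k : Int) :
    (PySem.Set.ofList m).discard k = PySem.Set.ofList (m.filter (fun b => !(b == k))) := by
  induction m with
  | nil => rfl
  | cons a m ih =>
    rw [PySem.Set.ofList_cons]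
    by_cases hak : a = k
    · subst hak
      rw [show (a :: m).filter (fun b => !(b == a)) = m.filter (fun b => !(b == a)) by
        simp]
      show ((a :: (PySem.Set.ofList m).discard a) : List Int).filter (fun y => !(y == a))
          = PySem.Set.ofList (m.filter fun b => !(b == a))
      rw [List.filter_cons]
      simp only [beq_self_eq_true, Bool.not_true]
      rw [if_neg (by simp)]
      show ((PySem.Set.ofList m).discard a).discard a = _
      have hidem : ((PySem.Set.ofList m).discard a).discard a = (PySem.Set.ofList m).discard a := by
        simp [PySem.Set.discard, List.filter_filter]
      rw [hidem, ih]
    · have hne : (a == k) = false := by simpa using hak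
      rw [show (a :: m).filter (fun b => !(b == k)) = a :: m.filter (fun b => !(b == k)) by
        simp [hne]]
      rw [PySem.Set.ofList_cons]
      show ((a :: (PySem.Set.ofList m).discard a) : List Int).filter (fun y => !(y == k))
          = a :: (PySem.Set.ofList (m.filter fun b => !(b == k))).discard a
      rw [List.filter_cons]
      simp only [hne, Bool.not_false, if_true]
      congr 1
      show ((PySem.Set.ofList m).discard a).discard k = _
      have hcomm : ((PySem.Set.ofList m).discard a).discard k
          = ((PySem.Set.ofList m).discard k).discard a := by
        simp [PySem.Set.discard, List.filter_filter, Bool.and_comm]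
      rw [hcomm, ih]

-- the run scan over a key-sorted list yields each distinct key with its filter
theorem pv_gb_eq (s : List String) (h : (s.map pvKey).Pairwise (· ≤ ·)) :
    pvGroupBy s = (PySem.Set.ofList (s.map pvKey)).map
      (fun k => (k, s.filter (fun y => pvKey y == k))) := by
  induction s using pvGroupBy.induct with
  | case1 => simp [pvGroupBy]
  | case2 x xs ih =>
    set p : String → Bool := fun y => pvKey y == pvKey x with hp
    set run := xs.takeWhile p with hrundef
    set rest := xs.dropWhile p with hrestdef
    have hxs : run ++ rest = xs := List.takeWhile_append_dropWhile
    have hmap : (x :: xs).map pvKey = pvKey x :: xs.map pvKey := rfl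
    have hle : ∀ y ∈ xs, pvKey x ≤ pvKey y := by
      have := (List.pairwise_cons.mp (hmap ▸ h)).1
      intro y hy
      exact this (pvKey y) (List.mem_map_of_mem hy)
    have htail : (xs.map pvKey).Pairwise (· ≤ ·) := (List.pairwise_cons.mp (hmap ▸ h)).2
    have hrun : ∀ y ∈ run, pvKey y = pvKey x := by
      intro y hy
      have := List.mem_takeWhile_imp hy
      simpa [hp] using this
    have hrestsub : rest.Sublist xs := List.dropWhile_sublist p
    have hrestpair : (rest.map pvKey).Pairwise (· ≤ ·) :=
      List.Pairwise.sublist (hrestsub.map pvKey) htail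
    have hrest : ∀ y ∈ rest, pvKey x < pvKey y := by
      intro y hy
      rcases hrest0 : rest with _ | ⟨r0, r'⟩
      · rw [hrest0] at hy; simp at hy
      · have hr0 : p r0 = false := by
          have := List.head_dropWhile_not p (l := xs) (by rw [← hrestdef, hrest0]; simp)
          simpa [← hrestdef, hrest0] using this
        have hr0x : pvKey r0 ≠ pvKey x := by simpa [hp] using hr0
        have hr0mem : r0 ∈ xs := hrestsub.mem (by rw [hrest0]; simp)
        have hxr0 : pvKey x < pvKey r0 := lt_of_le_of_ne (hle r0 hr0mem) (Ne.symm hr0x)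
        rw [hrest0] at hy
        rcases List.mem_cons.mp hy with rfl | hy'
        · exact hxr0
        · have hpair' : (∀ a ∈ r', pvKey r0 ≤ pvKey a) ∧
              List.Pairwise (fun a b => a ≤ b) (r'.map pvKey) := by
            simpa [hrest0] using hrestpair
          exact lt_of_lt_of_le hxr0 (hpair'.1 y hy')
    have hrestne : ∀ y ∈ rest, pvKey y ≠ pvKey x := fun y hy => ne_of_gt (hrest y hy)
    have hkeys : PySem.Set.ofList ((x :: xs).map pvKey)
        = pvKey x :: PySem.Set.ofList (rest.map pvKey) := by
      rw [hmap, PySem.Set.ofList_cons, pv_discard_ofList]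
      congr 1
      congr 1
      rw [← hxs, List.map_append, List.filter_append]
      have h1 : (run.map pvKey).filter (fun b => !(b == pvKey x)) = [] := by
        apply List.filter_eq_nil_iff.mpr
        intro b hb
        rcases List.mem_map.mp hb with ⟨y, hy, rfl⟩
        simp [hrun y hy]
      have h2 : (rest.map pvKey).filter (fun b => !(b == pvKey x)) = rest.map pvKey := by
        apply List.filter_eq_self.mpr
        intro b hb
        rcases List.mem_map.mp hb with ⟨y, hy, rfl⟩
        simp [hrestne y hy]
      rw [h1, h2, List.nil_append]
    have hgrp : (x :: xs).filter (fun y => pvKey y == pvKey x) = x :: run := by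
      rw [List.filter_cons]
      simp only [beq_self_eq_true, if_true]
      congr 1
      rw [← hxs, List.filter_append]
      have h1 : run.filter p = run := List.filter_eq_self.mpr (fun y hy => by simp [hp, hrun y hy])
      have h2 : rest.filter p = [] := List.filter_eq_nil_iff.mpr (fun y hy => by simp [hp, hrestne y hy])
      rw [show (fun y => pvKey y == pvKey x) = p from rfl, h1, h2, List.append_nil]
    have hother : ∀ k ∈ PySem.Set.ofList (rest.map pvKey),
        (x :: xs).filter (fun y => pvKey y == k) = rest.filter (fun y => pvKey y == k) := by
      intro k hk
      have hkmem : k ∈ rest.map pvKey := (PySem.Set.mem_ofList _ _).mp hk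
      rcases List.mem_map.mp hkmem with ⟨y0, hy0, rfl⟩
      have hkx : pvKey y0 ≠ pvKey x := hrestne y0 hy0
      rw [List.filter_cons]
      rw [if_neg (by simp [Ne.symm hkx])]
      rw [← hxs, List.filter_append]
      have h1 : run.filter (fun y => pvKey y == pvKey y0) = [] :=
        List.filter_eq_nil_iff.mpr (fun y hy => by simp [hrun y hy, Ne.symm hkx])
      rw [h1, List.nil_append]
    rw [pvGroupBy]
    rw [hkeys, List.map_cons, hgrp, ih hrestpair]
    congr 1
    apply List.map_congr_left
    intro k hk
    rw [hother k hk]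

-- inserting an element whose key misses the filter leaves the filter unchanged
theorem pv_filter_insertBy_neg (bef : String → String → Bool) (p : String → Bool)
    (x : String) (acc : List String) (h : p x = false) :
    (PySem.List.insertBy bef x acc).filter p = acc.filter p := by
  induction acc with
  | nil => simp [PySem.List.insertBy, h]
  | cons y ys ih =>
    rw [show PySem.List.insertBy bef x (y :: ys)
        = if bef x y then x :: y :: ys else y :: PySem.List.insertBy bef x ys from rfl]
    split_ifs
    · simp [List.filter_cons, h]
    · simp [List.filter_cons, ih]

-- stability of one insertion: x lands after all earlier elements of its key
theorem pv_filter_insertBy_pos (x : String) (acc : List String)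
    (hacc : acc.Pairwise (fun a b => pvKey a ≤ pvKey b)) :
    (PySem.List.insertBy (fun a b => decide (pvKey a < pvKey b)) x acc).filter
        (fun y => pvKey y == pvKey x)
      = acc.filter (fun y => pvKey y == pvKey x) ++ [x] := by
  induction acc with
  | nil => simp [PySem.List.insertBy]
  | cons y ys ih =>
    rw [show PySem.List.insertBy (fun a b => decide (pvKey a < pvKey b)) x (y :: ys)
        = if decide (pvKey x < pvKey y) then x :: y :: ys
          else y :: PySem.List.insertBy (fun a b => decide (pvKey a < pvKey b)) x ys from rfl]
    rcases List.pairwise_cons.mp hacc with ⟨hhead, htail⟩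
    split_ifs with hlt
    · have hlt' : pvKey x < pvKey y := by simpa using hlt
      have hy : (pvKey y == pvKey x) = false := by simp [ne_of_gt hlt']
      have hys : ys.filter (fun z => pvKey z == pvKey x) = [] := by
        apply List.filter_eq_nil_iff.mpr
        intro z hz
        simp [ne_of_gt (lt_of_lt_of_le hlt' (hhead z hz))]
      simp [hy, hys]
    · rw [List.filter_cons, List.filter_cons]
      split_ifs with hy
      · rw [ih htail]; rfl
      · exact ih htail

-- stability of the sort: the elements of any one key keep their input order
theorem pv_filter_sorted (l : List String) (c : Int) :
    (PySem.List.sorted l pvKey false).filter (fun y => pvKey y == c)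
      = l.filter (fun y => pvKey y == c) := by
  induction l using List.reverseRecOn with
  | nil => rfl
  | append_singleton l x ih =>
    have hstep : PySem.List.sorted (l ++ [x]) pvKey false
        = PySem.List.insertBy (fun a b => decide (pvKey a < pvKey b)) x
            (PySem.List.sorted l pvKey false) := by
      rw [PySem.List.sorted_eq_foldl_insertBy, PySem.List.sorted_eq_foldl_insertBy,
        List.foldl_append]
      rfl
    have hpair : (PySem.List.sorted l pvKey false).Pairwise (fun a b => pvKey a ≤ pvKey b) :=
      PySem.List.sorted_pairwise l pvKey
    rw [hstep]
    rcases hc : (pvKey x == c) with _ | _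
    · rw [pv_filter_insertBy_neg _ _ _ _ hc, ih, List.filter_append]
      simp [hc]
    · have hcx : c = pvKey x := (beq_iff_eq.mp hc).symm
      subst hcx
      rw [pv_filter_insertBy_pos x _ hpair, ih, List.filter_append]
      simp

-- ordered dedup of a nondecreasing list is strictly increasing
theorem pv_ofList_pairwise_lt (m : List Int) (h : m.Pairwise (· ≤ ·)) :
    (PySem.Set.ofList m : List Int).Pairwise (· < ·) := by
  induction m with
  | nil => simp [PySem.Set.ofList, PySem.Set.empty]
  | cons a m ih =>
    rw [PySem.Set.ofList_cons]
    rcases List.pairwise_cons.mp h with ⟨hhead, htail⟩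
    apply List.pairwise_cons.mpr
    constructor
    · intro b hb
      have hb' : b ∈ (PySem.Set.ofList m : List Int) ∧ b ≠ a := by
        simpa [PySem.Set.discard, List.mem_filter] using hb
      have : b ∈ m := (PySem.Set.mem_ofList m b).mp hb'.1
      exact lt_of_le_of_ne (hhead b this) (Ne.symm hb'.2)
    · exact List.Pairwise.filter _ (ih htail)

theorem B_eq_canon (l : List String) : generate_groups_alt l = pvCanon l := by
  unfold generate_groups_alt pvCanon
  rw [pv_gb_eq _ (PySem.List.sorted_map_key_pairwise l pvKey)]
  have hkeys : PySem.List.sorted (PySem.Set.ofList (l.map pvKey)) (fun k => k) false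
      = PySem.Set.ofList ((PySem.List.sorted l pvKey false).map pvKey) := by
    apply PySem.List.sorted_eq_of_perm_of_pairwise_lt
    · apply (List.perm_ext_iff_of_nodup (PySem.Set.nodup_ofList _) (PySem.Set.nodup_ofList _)).mpr
      intro a
      simp only [PySem.Set.mem_ofList, List.mem_map]
      constructor
      · rintro ⟨y, hy, rfl⟩
        exact ⟨y, (PySem.List.mem_sorted l pvKey false y).mp hy, rfl⟩
      · rintro ⟨y, hy, rfl⟩
        exact ⟨y, (PySem.List.mem_sorted l pvKey false y).mpr hy, rfl⟩
    · exact pv_ofList_pairwise_lt _ (PySem.List.sorted_map_key_pairwise l pvKey)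
  rw [hkeys]
  apply List.map_congr_left
  intro k _
  rw [pv_filter_sorted]

-- ===== VERDICT (by name: the statement is the Claim_ definition above) =====
theorem generate_groups_spec : Claim_equal_generate_groups := by
  intro l _
  unfold Spec_generate_groups
  rw [A_eq_canon, B_eq_canon]
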